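-- pv_equiv track=rewrite | github.com/adamsjt13/Making-Games | grid_game.py | convert_grid_coord
-- ===== SOURCE A (Python) =====
-- def convert_grid_coord(x,y):
--     """
--     This function takes in x and y coordinates and
--     converts it to the row and column of box clicked
--     """
--     # define default row and column if black space is clicked
--     row, column = 999, 999
--     # start and end coords of squares
--     start = list(range(4,230,25))
--     end = list(range(24,255,25))
--     # check to see if mouse click is in valid square
--     for i in range(len(start)):
--         if x > start[i] and x < end[i]:
--             column = i
--         if y > start[i] and y < end[i]:
--             row = i
--     return [row, column]
-- ===== SOURCE B (Python) =====
-- def convert_grid_coord(x, y):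
--     """Closed-form: compute the candidate cell index, then verify it
--     against the open interval (4+25*i, 24+25*i); 999 outside any cell."""
--     cx = (x - 4) // 25
--     cy = (y - 4) // 25
--     column = cx if 0 <= cx <= 9 and 4 + 25 * cx < x < 24 + 25 * cx else 999
--     row = cy if 0 <= cy <= 9 and 4 + 25 * cy < y < 24 + 25 * cy else 999
--     return [row, column]
-- ===== Notes on version B (the rewrite author's own statement) =====
-- stated objective: faster
-- what changed: Replaces the scan over the 10 start/end lists with a closed-form floor-division candidate index verified against the cell's open interval.
import Mathlib
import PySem

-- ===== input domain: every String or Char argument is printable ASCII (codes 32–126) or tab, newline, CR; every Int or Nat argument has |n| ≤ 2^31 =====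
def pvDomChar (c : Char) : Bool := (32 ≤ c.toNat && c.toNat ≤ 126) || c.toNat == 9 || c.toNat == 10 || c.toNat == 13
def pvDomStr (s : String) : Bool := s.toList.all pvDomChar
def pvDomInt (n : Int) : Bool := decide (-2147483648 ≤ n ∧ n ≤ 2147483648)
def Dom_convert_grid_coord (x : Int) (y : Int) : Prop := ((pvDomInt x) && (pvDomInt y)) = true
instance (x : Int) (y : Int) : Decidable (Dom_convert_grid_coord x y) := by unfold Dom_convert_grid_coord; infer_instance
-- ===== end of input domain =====

-- B replaces A's scan over the 10 start/end cell lists with a closed-form floor-division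
-- candidate index verified against the cell's open interval (constant-time, simpler).

-- ===== PORT A =====
def convert_grid_coord (x : Int) (y : Int) : List Int :=
  -- row, column = 999, 999; start = range(4,230,25); end = range(24,255,25)
  let start := PySem.List.pyRange 4 230 25
  let end_ := PySem.List.pyRange 24 255 25
  -- for i in range(len(start)): update column / row (indexing always in range here)
  let st := (PySem.List.pyRange 0 (Int.ofNat start.length) 1).foldl
    (fun (rc : Int × Int) i =>
      let s := (PySem.List.pyGet? start i).getD 0
      let e := (PySem.List.pyGet? end_ i).getD 0
      let column := if s < x ∧ x < e then i else rc.2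
      let row := if s < y ∧ y < e then i else rc.1
      (row, column)) (999, 999)
  [st.1, st.2]

-- ===== PORT B =====
def convert_grid_coord_alt (x : Int) (y : Int) : List Int :=
  let cx := PySem.Int.floordiv (x - 4) 25
  let cy := PySem.Int.floordiv (y - 4) 25
  let column := if 0 ≤ cx ∧ cx ≤ 9 ∧ 4 + 25 * cx < x ∧ x < 24 + 25 * cx then cx else 999
  let row := if 0 ≤ cy ∧ cy ≤ 9 ∧ 4 + 25 * cy < y ∧ y < 24 + 25 * cy then cy else 999
  [row, column]

-- ===== PRECONDITION & SPEC =====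
def Spec_convert_grid_coord (x : Int) (y : Int) (out : List Int) : Prop := out = convert_grid_coord_alt x y
instance (x : Int) (y : Int) (out : List Int) : Decidable (Spec_convert_grid_coord x y out) := by unfold Spec_convert_grid_coord; infer_instance

-- ===== CLAIM (what is proved, stated in full; the proofs are below) =====
def Claim_equal_convert_grid_coord : Prop := ∀ (x : Int) (y : Int), Dom_convert_grid_coord x y → Spec_convert_grid_coord x y (convert_grid_coord x y)

-- ===== LEMMAS AND PROOFS =====

-- the loop updates row and column independently; split the pair fold
lemma foldl_pair_split (f g : Int → Int → Int) (l : List Int) (a b : Int) :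
    l.foldl (fun rc i => (g rc.1 i, f rc.2 i)) (a, b) = (l.foldl g a, l.foldl f b) := by
  induction l generalizing a b with
  | nil => rfl
  | cons h t ih => simp [List.foldl, ih]

-- each coordinate is handled identically and independently; prove it once
lemma coord_eq (v : Int) :
    (if (229:Int) < v ∧ v < 249 then (9:Int) else
     if (204:Int) < v ∧ v < 224 then 8 else
     if (179:Int) < v ∧ v < 199 then 7 else
     if (154:Int) < v ∧ v < 174 then 6 else
     if (129:Int) < v ∧ v < 149 then 5 else
     if (104:Int) < v ∧ v < 124 then 4 else
     if (79:Int) < v ∧ v < 99 then 3 else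
     if (54:Int) < v ∧ v < 74 then 2 else
     if (29:Int) < v ∧ v < 49 then 1 else
     if (4:Int) < v ∧ v < 24 then 0 else 999)
    = (if 0 ≤ PySem.Int.floordiv (v - 4) 25 ∧ PySem.Int.floordiv (v - 4) 25 ≤ 9 ∧
          4 + 25 * PySem.Int.floordiv (v - 4) 25 < v ∧ v < 24 + 25 * PySem.Int.floordiv (v - 4) 25
       then PySem.Int.floordiv (v - 4) 25 else 999) := by
  rw [PySem.Int.floordiv_eq_ediv_of_pos (by norm_num)]
  split_ifs <;> omega

-- ===== VERDICT (by name: the statement is the Claim_ definition above) =====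
theorem convert_grid_coord_spec : Claim_equal_convert_grid_coord := by
  intro x y _
  unfold Spec_convert_grid_coord convert_grid_coord convert_grid_coord_alt
  have h1 : PySem.List.pyRange 4 230 25 = [4,29,54,79,104,129,154,179,204,229] := by decide
  have h2 : PySem.List.pyRange 24 255 25 = [24,49,74,99,124,149,174,199,224,249] := by decide
  have h3 : PySem.List.pyRange 0 (Int.ofNat ([4,29,54,79,104,129,154,179,204,229] : List Int).length)
      = ([0,1,2,3,4,5,6,7,8,9] : List Int) := by decide
  simp only [h1, h2, h3]
  rw [foldl_pair_split
    (fun c i => if (PySem.List.pyGet? [4,29,54,79,104,129,154,179,204,229] i).getD 0 < x ∧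
        x < (PySem.List.pyGet? [24,49,74,99,124,149,174,199,224,249] i).getD 0 then i else c)
    (fun r i => if (PySem.List.pyGet? [4,29,54,79,104,129,154,179,204,229] i).getD 0 < y ∧
        y < (PySem.List.pyGet? [24,49,74,99,124,149,174,199,224,249] i).getD 0 then i else r)
    [0,1,2,3,4,5,6,7,8,9] 999 999]
  have ps0 : (PySem.List.pyGet? ([4,29,54,79,104,129,154,179,204,229] : List Int) 0).getD 0 = 4 := by decide
  have pe0 : (PySem.List.pyGet? ([24,49,74,99,124,149,174,199,224,249] : List Int) 0).getD 0 = 24 := by decide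
  have ps1 : (PySem.List.pyGet? ([4,29,54,79,104,129,154,179,204,229] : List Int) 1).getD 0 = 29 := by decide
  have pe1 : (PySem.List.pyGet? ([24,49,74,99,124,149,174,199,224,249] : List Int) 1).getD 0 = 49 := by decide
  have ps2 : (PySem.List.pyGet? ([4,29,54,79,104,129,154,179,204,229] : List Int) 2).getD 0 = 54 := by decide
  have pe2 : (PySem.List.pyGet? ([24,49,74,99,124,149,174,199,224,249] : List Int) 2).getD 0 = 74 := by decide
  have ps3 : (PySem.List.pyGet? ([4,29,54,79,104,129,154,179,204,229] : List Int) 3).getD 0 = 79 := by decide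
  have pe3 : (PySem.List.pyGet? ([24,49,74,99,124,149,174,199,224,249] : List Int) 3).getD 0 = 99 := by decide
  have ps4 : (PySem.List.pyGet? ([4,29,54,79,104,129,154,179,204,229] : List Int) 4).getD 0 = 104 := by decide
  have pe4 : (PySem.List.pyGet? ([24,49,74,99,124,149,174,199,224,249] : List Int) 4).getD 0 = 124 := by decide
  have ps5 : (PySem.List.pyGet? ([4,29,54,79,104,129,154,179,204,229] : List Int) 5).getD 0 = 129 := by decide
  have pe5 : (PySem.List.pyGet? ([24,49,74,99,124,149,174,199,224,249] : List Int) 5).getD 0 = 149 := by decide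
  have ps6 : (PySem.List.pyGet? ([4,29,54,79,104,129,154,179,204,229] : List Int) 6).getD 0 = 154 := by decide
  have pe6 : (PySem.List.pyGet? ([24,49,74,99,124,149,174,199,224,249] : List Int) 6).getD 0 = 174 := by decide
  have ps7 : (PySem.List.pyGet? ([4,29,54,79,104,129,154,179,204,229] : List Int) 7).getD 0 = 179 := by decide
  have pe7 : (PySem.List.pyGet? ([24,49,74,99,124,149,174,199,224,249] : List Int) 7).getD 0 = 199 := by decide
  have ps8 : (PySem.List.pyGet? ([4,29,54,79,104,129,154,179,204,229] : List Int) 8).getD 0 = 204 := by decide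
  have pe8 : (PySem.List.pyGet? ([24,49,74,99,124,149,174,199,224,249] : List Int) 8).getD 0 = 224 := by decide
  have ps9 : (PySem.List.pyGet? ([4,29,54,79,104,129,154,179,204,229] : List Int) 9).getD 0 = 229 := by decide
  have pe9 : (PySem.List.pyGet? ([24,49,74,99,124,149,174,199,224,249] : List Int) 9).getD 0 = 249 := by decide
  simp only [List.foldl, ps0, ps1, ps2, ps3, ps4, ps5, ps6, ps7, ps8, ps9, pe0, pe1, pe2, pe3, pe4, pe5, pe6, pe7, pe8, pe9]
  rw [coord_eq x, coord_eq y]
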